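-- pv_equiv track=rewrite | github.com/Youxise/Document_Matching.IR | Boolean.py | isValidQuery
-- ===== SOURCE A (Python) =====
-- def isValidQuery(query_words):
--     if query_words[0] in ['and','or']:   # AND/OR cannot be at the beginning: false
--         return False
--     for i in range(len(query_words)):
--         # if the current word is AND/OR
--         if query_words[i] in ['and','or']:
--             if i == len(query_words)-1:  # if it's the last one: false
--                 return False
--             elif query_words[i+1] in ['and','or']: # if the next one is AND/OR: false
--                 return False
--         # if the current word is NOT
--         if query_words[i] == 'not':
--             if i == len(query_words)-1:  # if it's the last one: false
--                 return False
--             elif query_words[i+1] in ['and','or','not']: # if the next one is AND/OR/NOT: false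
--                 return False
--         # if the current word is a term
--         if query_words[i] not in ['and','or','not']:
--             if i == len(query_words)-1:  # if it's the last one: true
--                 return True
--             elif query_words[i+1] not in ['and','or']: # if the next one is not AND/OR: false
--                 return False
--     return True
-- ===== SOURCE B (Python) =====
-- def isValidQuery(query_words):
--     if query_words[0] in ['and', 'or']:  # no leading operator (IndexError on empty, as in A)
--         return False
--     # DFA over token categories: 0 = expect optional 'not' then term, 1 = expect term,
--     # 2 = just read a term (accepting), -1 = dead
--     state = 0
--     for w in query_words:
--         c = 'o' if w in ('and', 'or') else 'n' if w == 'not' else 't'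
--         if state == 0:
--             state = 2 if c == 't' else 1 if c == 'n' else -1
--         elif state == 1:
--             state = 2 if c == 't' else -1
--         elif state == 2:
--             state = 0 if c == 'o' else -1
--     return state == 2
-- ===== Notes on version B (the rewrite author's own statement) =====
-- stated objective: alternative
-- what changed: Replaces A's per-index lookahead checks (inspecting query_words[i+1] and last-index cases inside three if-groups) with a single left-to-right DFA over token categories (operator/not/term) whose final state decides validity.
import Mathlib
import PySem

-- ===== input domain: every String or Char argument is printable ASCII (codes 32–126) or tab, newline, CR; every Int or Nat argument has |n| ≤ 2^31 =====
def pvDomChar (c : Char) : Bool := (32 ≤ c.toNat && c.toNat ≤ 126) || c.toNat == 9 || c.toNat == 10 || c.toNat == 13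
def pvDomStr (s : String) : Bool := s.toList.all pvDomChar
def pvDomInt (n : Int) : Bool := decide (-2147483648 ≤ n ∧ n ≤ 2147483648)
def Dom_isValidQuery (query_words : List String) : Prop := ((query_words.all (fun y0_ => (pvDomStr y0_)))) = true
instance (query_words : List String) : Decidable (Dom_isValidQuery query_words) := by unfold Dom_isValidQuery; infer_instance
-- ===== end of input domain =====

-- B replaces A's indexed lookahead checks with a category DFA (alternative, same cost);
-- both raise IndexError on the empty list (excluded by Pre_).

-- ===== PORT A =====
-- A's for-loop over range(len), transcribed as index recursion; the three if-groups of
-- the body are mutually exclusive on query_words[i], so they are written as an if-chain.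
def isValidQueryLoopA (qs : List String) (i : Nat) : Bool :=
  if _h : i < qs.length then
    let w := qs.getD i ""
    if w = "and" || w = "or" then
      if i = qs.length - 1 then false
      else if (qs.getD (i+1) "") = "and" || (qs.getD (i+1) "") = "or" then false
      else isValidQueryLoopA qs (i+1)
    else if w = "not" then
      if i = qs.length - 1 then false
      else if (qs.getD (i+1) "") = "and" || (qs.getD (i+1) "") = "or" || (qs.getD (i+1) "") = "not" then false
      else isValidQueryLoopA qs (i+1)
    else
      if i = qs.length - 1 then true
      else if !((qs.getD (i+1) "") = "and" || (qs.getD (i+1) "") = "or") then false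
      else isValidQueryLoopA qs (i+1)
  else true
termination_by qs.length - i

def isValidQuery (query_words : List String) : Bool :=
  match query_words with
  | [] => false   -- Python raises IndexError here; excluded by Pre_
  | w0 :: _ =>
    if w0 = "and" || w0 = "or" then false
    else isValidQueryLoopA query_words 0

-- ===== PORT B =====
def pvCatOf (w : String) : Char :=
  if w = "and" || w = "or" then 'o' else if w = "not" then 'n' else 't'

def pvDfaStep (state : Int) (w : String) : Int :=
  let c := pvCatOf w
  if state = 0 then (if c = 't' then 2 else if c = 'n' then 1 else -1)
  else if state = 1 then (if c = 't' then 2 else -1)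
  else if state = 2 then (if c = 'o' then 0 else -1)
  else state

def isValidQuery_alt (query_words : List String) : Bool :=
  match query_words with
  | [] => false   -- Python raises IndexError here; excluded by Pre_
  | w0 :: _ =>
    if w0 = "and" || w0 = "or" then false
    else decide (query_words.foldl pvDfaStep 0 = 2)

-- ===== PRECONDITION & SPEC =====
-- Pre_ excludes only the empty list, on which A (and B) raise IndexError at query_words[0].
def Pre_isValidQuery (query_words : List String) : Prop := query_words ≠ []
instance (query_words : List String) : Decidable (Pre_isValidQuery query_words) := by unfold Pre_isValidQuery; infer_instance
def pvWitness_isValidQuery : List String := (["apple"])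

def Spec_isValidQuery (query_words : List String) (out : Bool) : Prop := out = isValidQuery_alt query_words
instance (query_words : List String) (out : Bool) : Decidable (Spec_isValidQuery query_words out) := by unfold Spec_isValidQuery; infer_instance

-- ===== CLAIM (what is proved, stated in full; the proofs are below) =====
def Claim_equal_isValidQuery : Prop := ∀ (query_words : List String), Dom_isValidQuery query_words → Pre_isValidQuery query_words → Spec_isValidQuery query_words (isValidQuery query_words)

-- ===== LEMMAS AND PROOFS =====

-- A's loop rephrased structurally on the suffix list.
def loopS : List String → Bool
  | [] => true
  | [w] =>
    if w = "and" || w = "or" then false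
    else if w = "not" then false
    else true
  | w :: w' :: rest =>
    if w = "and" || w = "or" then
      (if w' = "and" || w' = "or" then false else loopS (w' :: rest))
    else if w = "not" then
      (if w' = "and" || w' = "or" || w' = "not" then false else loopS (w' :: rest))
    else
      (if !(w' = "and" || w' = "or") then false else loopS (w' :: rest))

theorem loopA_eq_loopS (qs : List String) (i : Nat) :
    isValidQueryLoopA qs i = loopS (qs.drop i) := by
  unfold isValidQueryLoopA
  split
  case isTrue h =>
    have hget : qs.getD i "" = qs[i] := List.getD_eq_getElem qs "" h
    have hdrop : qs.drop i = qs[i] :: qs.drop (i+1) := List.drop_eq_getElem_cons h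
    by_cases hlast : i = qs.length - 1
    · have hnil : qs.drop (i+1) = [] := List.drop_eq_nil_of_le (by omega)
      rw [hget, hdrop, hnil]
      simp [loopS, hlast]
    · have h1 : i + 1 < qs.length := by omega
      have hdrop2 : qs.drop (i+1) = qs[i+1] :: qs.drop (i+2) := List.drop_eq_getElem_cons h1
      have hget1 : qs.getD (i+1) "" = qs[i+1] := List.getD_eq_getElem qs "" h1
      have IH := loopA_eq_loopS qs (i+1)
      rw [hdrop, hdrop2]
      rw [hdrop2] at IH
      rw [hget, hget1]
      simp only [loopS, ← IH]
      simp only [hlast, if_false]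
  case isFalse h =>
    have hnil : qs.drop i = [] := List.drop_eq_nil_of_le (by omega)
    simp [hnil, loopS]
termination_by qs.length - i

theorem dead_absorb (l : List String) : l.foldl pvDfaStep (-1) = -1 := by
  induction l with
  | nil => rfl
  | cons w rest ih => simpa [pvDfaStep] using ih

-- loopS on a nonempty suffix equals the DFA started in the state that precedes its head's category.
theorem loopS_eq_dfa (w : String) (rest : List String) :
    loopS (w :: rest) =
      decide ((w :: rest).foldl pvDfaStep (if w = "and" || w = "or" then 2 else 0) = 2) := by
  induction rest generalizing w with
  | nil =>
    by_cases h1 : w = "and" || w = "or" <;> by_cases h2 : w = "not" <;>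
      simp_all [loopS, pvDfaStep, pvCatOf]
  | cons w2 rest2 ih =>
    have IH := ih w2
    by_cases h1 : w = "and" || w = "or" <;> by_cases h2 : w = "not" <;>
      by_cases g1 : w2 = "and" || w2 = "or" <;> by_cases g2 : w2 = "not" <;>
      simp_all [loopS, pvDfaStep, pvCatOf, dead_absorb]

-- ===== VERDICT (by name: the statement is the Claim_ definition above) =====
theorem isValidQuery_spec : Claim_equal_isValidQuery := by
  intro qs _ hpre
  unfold Spec_isValidQuery
  match qs with
  | [] => exact absurd rfl hpre
  | w0 :: rest =>
    unfold isValidQuery isValidQuery_alt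
    by_cases h : w0 = "and" || w0 = "or"
    · simp [h]
    · simp only [h, if_false, Bool.false_eq_true]
      rw [show isValidQueryLoopA (w0 :: rest) 0 = loopS ((w0 :: rest).drop 0) from loopA_eq_loopS _ 0]
      simpa [h] using loopS_eq_dfa w0 rest
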